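-- pv_equiv track=rewrite | github.com/Mercerenies/eulers-melting-pot | etc/problem204_1.py | enumerate_hamming_numbers
-- ===== SOURCE A (Python) =====
-- PRIMES = [2, 3, 5, 7, 11, 13, 17, 19, 23, 29, 31, 37,
--           41, 43, 47, 53, 59, 61, 67, 71, 73, 79, 83, 89, 97]
--
-- LIMIT = int(1e9)
--
-- def enumerate_hamming_numbers(base: int, index: int) -> int:
--     if base > LIMIT:
--         return 0
--     if index >= len(PRIMES):
--         return 1
--     total = 0
--     while base <= LIMIT:
--         total += enumerate_hamming_numbers(base, index + 1)
--         base *= PRIMES[index]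
--     return total
-- ===== SOURCE B (Python) =====
-- PRIMES = [2, 3, 5, 7, 11, 13, 17, 19, 23, 29, 31, 37,
--           41, 43, 47, 53, 59, 61, 67, 71, 73, 79, 83, 89, 97]
--
-- LIMIT = int(1e9)
--
-- def enumerate_hamming_numbers(base: int, index: int) -> int:
--     if base > LIMIT:
--         return 0
--     if index >= len(PRIMES):
--         return 1
--     # "skip this prime" / "take one more factor of this prime" binary recursion
--     return (enumerate_hamming_numbers(base, index + 1)
--             + enumerate_hamming_numbers(base * PRIMES[index], index))
-- ===== Notes on version B (the rewrite author's own statement) =====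
-- stated objective: simpler
-- what changed: Replaced A's while-loop that enumerates all powers of PRIMES[index] and sums a recursive call per power with a plain two-way recursion ('skip this prime' vs 'take one more factor of it'), eliminating the loop and the accumulator.
import Mathlib
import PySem

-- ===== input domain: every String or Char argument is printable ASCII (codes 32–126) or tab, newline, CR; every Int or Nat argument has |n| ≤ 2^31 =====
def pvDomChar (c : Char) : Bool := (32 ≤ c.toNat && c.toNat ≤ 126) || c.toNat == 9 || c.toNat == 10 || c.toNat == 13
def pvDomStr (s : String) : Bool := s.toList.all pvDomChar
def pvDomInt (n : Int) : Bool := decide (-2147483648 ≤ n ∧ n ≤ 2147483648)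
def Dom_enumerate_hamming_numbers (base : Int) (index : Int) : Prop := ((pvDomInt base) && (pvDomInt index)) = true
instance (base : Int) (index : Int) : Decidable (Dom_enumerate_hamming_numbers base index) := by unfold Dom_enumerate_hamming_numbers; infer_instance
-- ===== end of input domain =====

-- B replaces A's powers-of-PRIMES[index] while-loop (with accumulator) by a plain binary
-- recursion (skip this prime / take one more factor of it): simpler, same cost.
-- Both ports carry a Nat fuel argument purely as a totality guard (the Python functions
-- recurse/loop forever on base ≤ 0 with index < 25; those inputs are outside Pre_).

-- ===== PORT A =====
def pvPRIMES : List Int :=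
  [2, 3, 5, 7, 11, 13, 17, 19, 23, 29, 31, 37,
   41, 43, 47, 53, 59, 61, 67, 71, 73, 79, 83, 89, 97]

def pvLIMIT : Int := 1000000000

-- A's while-loop `while base <= LIMIT: total += f(base, index+1); base *= PRIMES[index]`,
-- with `f base = enumerate_hamming_numbers base (index+1)` passed in; the fuel never runs
-- out when 1 ≤ base (base strictly grows each iteration).
def pvLoopA (f : Int → Int) (index : Int) : Nat → Int → Int → Int
  | 0, _, total => total                    -- fuel exhausted: unreachable under Pre_
  | m + 1, base, total =>
    if base ≤ pvLIMIT then
      match PySem.List.pyGet? pvPRIMES index with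
      | none => total + f base              -- Python: the recursive call runs, then PRIMES[index] raises IndexError (outside Pre_)
      | some p => pvLoopA f index m (base * p) (total + f base)
    else total

-- literal transliteration of A: guards in order, then the while-loop
def pvFA : Nat → Int → Int → Int
  | 0, _, _ => 0                            -- fuel exhausted: unreachable under Pre_
  | k + 1, base, index =>
    if base > pvLIMIT then 0
    else if index ≥ 25 then 1               -- index >= len(PRIMES)
    else pvLoopA (fun b => pvFA k b (index + 1)) index ((pvLIMIT + 1 - base).toNat + 1) base 0

def enumerate_hamming_numbers (base : Int) (index : Int) : Int :=
  pvFA ((25 - index).toNat + 1) base index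

-- ===== PORT B =====
def pvFB : Nat → Int → Int → Int
  | 0, _, _ => 0                            -- fuel exhausted: unreachable under Pre_
  | n + 1, base, index =>
    if base > pvLIMIT then 0
    else if index ≥ 25 then 1
    else
      match PySem.List.pyGet? pvPRIMES index with
      | none => 0                           -- PRIMES[index] raises IndexError in Python (outside Pre_)
      | some p => pvFB n base (index + 1) + pvFB n (base * p) index

def enumerate_hamming_numbers_alt (base : Int) (index : Int) : Int :=
  pvFB ((25 - index).toNat + (pvLIMIT + 1 - base).toNat + 1) base index

-- ===== PRECONDITION & SPEC =====
-- Pre_ excludes exactly the inputs on which Python A does not return normally: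
-- with base ≤ 0 and index < 25 the while-loop never terminates (base*PRIMES[index] never
-- exceeds LIMIT), and with 1 ≤ base ≤ LIMIT and index ≤ -26 PRIMES[index] raises IndexError.
def Pre_enumerate_hamming_numbers (base : Int) (index : Int) : Prop :=
  base > pvLIMIT ∨ index ≥ 25 ∨ (1 ≤ base ∧ -25 ≤ index)
instance (base : Int) (index : Int) : Decidable (Pre_enumerate_hamming_numbers base index) := by
  unfold Pre_enumerate_hamming_numbers; infer_instance

def pvWitness_enumerate_hamming_numbers : Int × Int := (999999000, 3)

def Spec_enumerate_hamming_numbers (base : Int) (index : Int) (out : Int) : Prop := out = enumerate_hamming_numbers_alt base index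
instance (base : Int) (index : Int) (out : Int) : Decidable (Spec_enumerate_hamming_numbers base index out) := by unfold Spec_enumerate_hamming_numbers; infer_instance

-- ===== CLAIM (what is proved, stated in full; the proofs are below) =====
def Claim_equal_enumerate_hamming_numbers : Prop := ∀ (base : Int) (index : Int), Dom_enumerate_hamming_numbers base index → Pre_enumerate_hamming_numbers base index → Spec_enumerate_hamming_numbers base index (enumerate_hamming_numbers base index)

-- ===== LEMMAS AND PROOFS =====

theorem pvPrime_two_le {index p : Int} (h : PySem.List.pyGet? pvPRIMES index = some p) :
    2 ≤ p := by
  have hm := PySem.List.mem_of_pyGet?_eq_some pvPRIMES h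
  fin_cases hm <;> norm_num

theorem pvPrime_exists {index : Int} (h1 : -25 ≤ index) (h2 : index < 25) :
    ∃ p, PySem.List.pyGet? pvPRIMES index = some p := by
  cases hg : PySem.List.pyGet? pvPRIMES index with
  | some p => exact ⟨p, rfl⟩
  | none =>
    rw [PySem.List.pyGet?_eq_none_iff] at hg
    exact absurd (by unfold PySem.Raise.InRange; simp only [pvPRIMES, List.length]; omega) hg

-- pvFB is fuel-stable above the (index depth + room below LIMIT) bound.
theorem pvFB_mono : ∀ (n m : Nat) (base index : Int), 1 ≤ base → -25 ≤ index →
    (25 - index).toNat + (pvLIMIT + 1 - base).toNat < n → n ≤ m →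
    pvFB n base index = pvFB m base index := by
  intro n
  induction n with
  | zero => intro m base index _ _ hn _; omega
  | succ n ih =>
    intro m base index hb hi hn hm
    obtain ⟨m', rfl⟩ : ∃ m', m = m' + 1 := ⟨m - 1, by omega⟩
    rw [pvFB, pvFB]
    by_cases hgt : base > pvLIMIT
    · simp [hgt]
    · by_cases hi25 : index ≥ 25
      · simp [hi25]
      · simp only [hgt, if_false, hi25, if_false]
        obtain ⟨p, hp⟩ := pvPrime_exists hi (by omega)
        rw [hp]
        have hp2 : 2 ≤ p := pvPrime_two_le hp
        have hlt : base < base * p := by nlinarith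
        show pvFB n base (index + 1) + pvFB n (base * p) index
           = pvFB m' base (index + 1) + pvFB m' (base * p) index
        rw [ih m' base (index + 1) hb (by omega) (by omega) (by omega),
            ih m' (base * p) index (by nlinarith) hi (by omega) (by omega)]

-- B's value is 0 above the limit …
theorem pvAlt_gt {base index : Int} (hgt : base > pvLIMIT) :
    enumerate_hamming_numbers_alt base index = 0 := by
  rw [enumerate_hamming_numbers_alt, pvFB]
  simp [hgt]

-- … 1 past the last prime …
theorem pvAlt_last {base index : Int} (hle : ¬ base > pvLIMIT) (hi25 : index ≥ 25) :
    enumerate_hamming_numbers_alt base index = 1 := by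
  rw [enumerate_hamming_numbers_alt, pvFB]
  simp [hle, hi25]

-- … and otherwise satisfies the skip/take recurrence.
theorem pvAlt_rec {base index p : Int} (hb : 1 ≤ base) (hle : ¬ base > pvLIMIT)
    (hi : -25 ≤ index) (hi25 : ¬ index ≥ 25)
    (hp : PySem.List.pyGet? pvPRIMES index = some p) :
    enumerate_hamming_numbers_alt base index =
      enumerate_hamming_numbers_alt base (index + 1) +
      enumerate_hamming_numbers_alt (base * p) index := by
  have hp2 : 2 ≤ p := pvPrime_two_le hp
  have hlt : base < base * p := by nlinarith
  rw [enumerate_hamming_numbers_alt, pvFB]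
  simp only [hle, if_false, hi25, if_false, hp]
  rw [enumerate_hamming_numbers_alt, enumerate_hamming_numbers_alt]
  rw [show (25 - (index + 1)).toNat + (pvLIMIT + 1 - base).toNat + 1
        = (25 - index).toNat + (pvLIMIT + 1 - base).toNat from by omega]
  rw [pvFB_mono ((25 - index).toNat + (pvLIMIT + 1 - base * p).toNat + 1)
        ((25 - index).toNat + (pvLIMIT + 1 - base).toNat) (base * p) index
        (by nlinarith) hi (by omega) (by omega)]

-- A's while-loop accumulates exactly `total +` B's value, given B's value at index+1.
theorem pvLoopA_eq (g : Int → Int) (index : Int) (hi : -25 ≤ index) (hi25 : index < 25)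
    (H : ∀ b, 1 ≤ b → g b = enumerate_hamming_numbers_alt b (index + 1)) :
    ∀ (m : Nat) (base total : Int), 1 ≤ base → (pvLIMIT + 1 - base).toNat < m →
      pvLoopA g index m base total = total + enumerate_hamming_numbers_alt base index := by
  intro m
  induction m with
  | zero => intro base total _ hm; omega
  | succ m ih =>
    intro base total hb hm
    rw [pvLoopA]
    by_cases hle : base ≤ pvLIMIT
    · obtain ⟨p, hp⟩ := pvPrime_exists hi hi25
      have hp2 : 2 ≤ p := pvPrime_two_le hp
      have hlt : base < base * p := by nlinarith
      simp only [hle, if_true, hp]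
      rw [ih (base * p) (total + g base) (by nlinarith) (by omega)]
      rw [H base hb, pvAlt_rec hb (by omega) hi (by omega) hp]
      ring
    · simp only [hle, if_false]
      rw [pvAlt_gt (by omega)]
      ring

-- Main induction on the index-depth fuel.
theorem pvFA_eq : ∀ (k : Nat) (base index : Int), 1 ≤ base → -25 ≤ index →
    (25 - index).toNat < k → pvFA k base index = enumerate_hamming_numbers_alt base index := by
  intro k
  induction k with
  | zero => intro base index _ _ hk; omega
  | succ k ih =>
    intro base index hb hi hk
    rw [pvFA]
    by_cases hgt : base > pvLIMIT
    · rw [pvAlt_gt hgt]; simp [hgt]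
    · by_cases hi25 : index ≥ 25
      · rw [pvAlt_last hgt hi25]; simp [hgt, hi25]
      · simp only [hgt, if_false, hi25, if_false]
        rw [pvLoopA_eq (fun b => pvFA k b (index + 1)) index hi (by omega)
            (fun b hb' => ih b (index + 1) hb' (by omega) (by omega))
            ((pvLIMIT + 1 - base).toNat + 1) base 0 hb (by omega)]
        exact zero_add _

-- ===== VERDICT (by name: the statement is the Claim_ definition above) =====
theorem enumerate_hamming_numbers_spec : Claim_equal_enumerate_hamming_numbers := by
  intro base index _hdom hpre
  unfold Spec_enumerate_hamming_numbers
  rcases hpre with hgt | hi25 | ⟨hb, hi⟩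
  · rw [enumerate_hamming_numbers, pvFA, pvAlt_gt hgt]; simp [hgt]
  · by_cases hgt : base > pvLIMIT
    · rw [enumerate_hamming_numbers, pvFA, pvAlt_gt hgt]; simp [hgt]
    · rw [enumerate_hamming_numbers, pvFA, pvAlt_last hgt hi25]; simp [hgt, hi25]
  · exact pvFA_eq ((25 - index).toNat + 1) base index hb hi (by omega)
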